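-- pv_equiv track=rewrite | github.com/teamnxtone-stack/NXT1 | backend/services/memory_service.py | quick_summary
-- ===== SOURCE A (Python) =====
-- from typing import List, Dict
--
-- def quick_summary(files: List[dict]) -> str:
--     """A deterministic, rule-based summary used as a fast fallback when AI
--     summary is not yet computed.
--     """
--     n_html = sum(1 for f in files if f["path"].endswith(".html"))
--     n_css = sum(1 for f in files if f["path"].endswith(".css"))
--     n_js = sum(1 for f in files if f["path"].endswith(".js"))
--     n_py = sum(1 for f in files if f["path"].endswith(".py"))
--     has_backend = any(f["path"].startswith("backend/") for f in files)
--     n_pages = sum(1 for f in files if f["path"].endswith(".html"))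
--     parts = [f"{len(files)} files"]
--     if n_pages: parts.append(f"{n_pages} HTML page(s)")
--     if n_css: parts.append(f"{n_css} CSS")
--     if n_js: parts.append(f"{n_js} JS")
--     if n_py: parts.append(f"{n_py} Python")
--     if has_backend: parts.append("backend present")
--     return " · ".join(parts)
-- ===== SOURCE B (Python) =====
-- def quick_summary(files):
--     n_html = n_css = n_js = n_py = 0
--     has_backend = False
--     for f in files:
--         p = f["path"]
--         if p.endswith(".html"): n_html += 1
--         if p.endswith(".css"): n_css += 1
--         if p.endswith(".js"): n_js += 1
--         if p.endswith(".py"): n_py += 1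
--         if p.startswith("backend/"): has_backend = True
--     parts = [f"{len(files)} files"]
--     if n_html: parts.append(f"{n_html} HTML page(s)")
--     if n_css: parts.append(f"{n_css} CSS")
--     if n_js: parts.append(f"{n_js} JS")
--     if n_py: parts.append(f"{n_py} Python")
--     if has_backend: parts.append("backend present")
--     return " · ".join(parts)
-- ===== Notes on version B (the rewrite author's own statement) =====
-- stated objective: alternative
-- what changed: Replaces A's six separate scans of the file list (five comprehensions plus a duplicate HTML recount) with one loop that fetches each file's path once and updates four counters and a backend flag.
import Mathlib
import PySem

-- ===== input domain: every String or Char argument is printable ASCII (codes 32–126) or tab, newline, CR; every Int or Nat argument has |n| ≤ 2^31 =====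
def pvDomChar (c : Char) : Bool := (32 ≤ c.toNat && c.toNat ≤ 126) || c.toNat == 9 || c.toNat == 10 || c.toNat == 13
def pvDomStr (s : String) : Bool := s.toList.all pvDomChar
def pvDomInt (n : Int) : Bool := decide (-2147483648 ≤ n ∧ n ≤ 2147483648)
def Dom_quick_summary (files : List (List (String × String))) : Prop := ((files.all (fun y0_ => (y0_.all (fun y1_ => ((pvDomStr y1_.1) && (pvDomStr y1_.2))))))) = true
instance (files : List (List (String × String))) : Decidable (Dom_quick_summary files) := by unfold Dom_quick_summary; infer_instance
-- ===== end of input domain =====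

-- B replaces A's six separate scans of the file list with one loop that reads each
-- file's path once and maintains four counters and a backend flag (one traversal
-- instead of six; timing not measured, so no speed is claimed).

-- f["path"]: first value for key "path" ("" never used: Pre_ guarantees the key exists)
def qsPath (f : List (String × String)) : String :=
  ((PySem.Dict.ofList f).get? "path").getD ""

-- ===== PORT A =====
def quick_summary (files : List (List (String × String))) : String :=
  let _n_html := files.countP (fun f => PySem.Str.endswith (qsPath f) ".html")
  let n_css := files.countP (fun f => PySem.Str.endswith (qsPath f) ".css")
  let n_js := files.countP (fun f => PySem.Str.endswith (qsPath f) ".js")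
  let n_py := files.countP (fun f => PySem.Str.endswith (qsPath f) ".py")
  let has_backend := files.any (fun f => PySem.Str.startswith (qsPath f) "backend/")
  let n_pages := files.countP (fun f => PySem.Str.endswith (qsPath f) ".html")
  let parts := [PySem.Int.toStr (files.length : Int) ++ " files"]
  let parts := if n_pages ≠ 0 then parts ++ [PySem.Int.toStr (n_pages : Int) ++ " HTML page(s)"] else parts
  let parts := if n_css ≠ 0 then parts ++ [PySem.Int.toStr (n_css : Int) ++ " CSS"] else parts
  let parts := if n_js ≠ 0 then parts ++ [PySem.Int.toStr (n_js : Int) ++ " JS"] else parts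
  let parts := if n_py ≠ 0 then parts ++ [PySem.Int.toStr (n_py : Int) ++ " Python"] else parts
  let parts := if has_backend then parts ++ ["backend present"] else parts
  PySem.Str.join " · " parts

-- ===== PORT B =====
def qsStep : (Nat × Nat × Nat × Nat × Bool) → List (String × String) → (Nat × Nat × Nat × Nat × Bool)
  | (a, b, c, d, e), f =>
    let p := qsPath f
    (a + (if PySem.Str.endswith p ".html" then 1 else 0),
     b + (if PySem.Str.endswith p ".css" then 1 else 0),
     c + (if PySem.Str.endswith p ".js" then 1 else 0),
     d + (if PySem.Str.endswith p ".py" then 1 else 0),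
     e || PySem.Str.startswith p "backend/")

def quick_summary_alt (files : List (List (String × String))) : String :=
  let s := files.foldl qsStep (0, 0, 0, 0, false)
  let n_html := s.1
  let n_css := s.2.1
  let n_js := s.2.2.1
  let n_py := s.2.2.2.1
  let has_backend := s.2.2.2.2
  let parts := [PySem.Int.toStr (files.length : Int) ++ " files"]
  let parts := if n_html ≠ 0 then parts ++ [PySem.Int.toStr (n_html : Int) ++ " HTML page(s)"] else parts
  let parts := if n_css ≠ 0 then parts ++ [PySem.Int.toStr (n_css : Int) ++ " CSS"] else parts
  let parts := if n_js ≠ 0 then parts ++ [PySem.Int.toStr (n_js : Int) ++ " JS"] else parts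
  let parts := if n_py ≠ 0 then parts ++ [PySem.Int.toStr (n_py : Int) ++ " Python"] else parts
  let parts := if has_backend then parts ++ ["backend present"] else parts
  PySem.Str.join " · " parts

-- ===== PRECONDITION & SPEC =====
-- Pre_ excludes exactly the inputs where some file dict lacks the key "path",
-- on which Python A raises KeyError (and B does too).
def Pre_quick_summary (files : List (List (String × String))) : Prop :=
  (files.all (fun f => f.any (fun kv => kv.1 == "path"))) = true
instance (files : List (List (String × String))) : Decidable (Pre_quick_summary files) := by
  unfold Pre_quick_summary; infer_instance

def pvWitness_quick_summary : (List (List (String × String))) :=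
  [[("path", "index.html")], [("path", "backend/app.py")]]

def Spec_quick_summary (files : List (List (String × String))) (out : String) : Prop := out = quick_summary_alt files
instance (files : List (List (String × String))) (out : String) : Decidable (Spec_quick_summary files out) := by unfold Spec_quick_summary; infer_instance

-- ===== CLAIM (what is proved, stated in full; the proofs are below) =====
def Claim_equal_quick_summary : Prop := ∀ (files : List (List (String × String))), Dom_quick_summary files → Pre_quick_summary files → Spec_quick_summary files (quick_summary files)

-- ===== LEMMAS AND PROOFS =====
theorem qsLoop (files : List (List (String × String))) (a b c d : Nat) (e : Bool) :
    files.foldl qsStep (a, b, c, d, e) =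
      (a + files.countP (fun f => PySem.Str.endswith (qsPath f) ".html"),
       b + files.countP (fun f => PySem.Str.endswith (qsPath f) ".css"),
       c + files.countP (fun f => PySem.Str.endswith (qsPath f) ".js"),
       d + files.countP (fun f => PySem.Str.endswith (qsPath f) ".py"),
       e || files.any (fun f => PySem.Str.startswith (qsPath f) "backend/")) := by
  induction files generalizing a b c d e with
  | nil => simp
  | cons f t ih =>
    simp only [List.foldl_cons, qsStep, ih, List.countP_cons, List.any_cons, Prod.mk.injEq]
    refine ⟨by omega, by omega, by omega, by omega, by simp [Bool.or_assoc]⟩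

-- ===== VERDICT (by name: the statement is the Claim_ definition above) =====
theorem quick_summary_spec : Claim_equal_quick_summary := by
  intro files _ _
  unfold Spec_quick_summary quick_summary quick_summary_alt
  simp [qsLoop]
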